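-- pv_equiv track=rewrite | github.com/sylyoung/TestEnsemble | regression_stackingnet.py | make_unique_index
-- ===== SOURCE A (Python) =====
-- def make_unique_index(index):
--     unique_index = []
--     counts = {}
--     for item in index:
--         if item in counts:
--             counts[item] += 1
--             unique_index.append(f"{item}_{counts[item]}")
--         else:
--             counts[item] = 0
--             unique_index.append(item)
--     return unique_index
-- ===== SOURCE B (Python) =====
-- def make_unique_index(index):
--     seq = list(index)
--     positions = {}
--     for i, item in enumerate(seq):
--         positions.setdefault(item, []).append(i)
--     out = [None] * len(seq)
--     for item, ps in positions.items():
--         for k, p in enumerate(ps):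
--             out[p] = item if k == 0 else f"{item}_{k}"
--     return out
-- ===== Notes on version B (the rewrite author's own statement) =====
-- stated objective: alternative
-- what changed: Replaces A's single pass with an incrementally maintained running counter by a two-phase group-and-scatter algorithm: first bucket every item's positions into a dict of position lists, then write each occurrence's label into a preallocated output array by position.
import Mathlib
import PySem

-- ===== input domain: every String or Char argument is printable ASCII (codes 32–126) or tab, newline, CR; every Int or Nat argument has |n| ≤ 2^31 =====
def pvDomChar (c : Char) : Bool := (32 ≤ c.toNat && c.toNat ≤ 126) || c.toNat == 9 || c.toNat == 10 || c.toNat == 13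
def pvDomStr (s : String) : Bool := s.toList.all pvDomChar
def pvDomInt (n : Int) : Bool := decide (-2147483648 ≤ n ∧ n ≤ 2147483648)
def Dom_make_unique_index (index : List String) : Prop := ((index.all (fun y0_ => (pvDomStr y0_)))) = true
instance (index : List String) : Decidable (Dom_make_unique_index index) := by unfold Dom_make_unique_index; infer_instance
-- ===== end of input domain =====

-- B replaces A's one-pass running-counter labelling by a two-phase group-and-scatter:
-- bucket each item's positions into a dict of position lists, then write each occurrence's
-- label into a preallocated output array by position (alternative algorithm, not claimed faster).

-- ===== PORT A =====
-- loop body of A's for-loop: state = (unique_index, counts)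
def mkuStep (st : List String × PySem.Dict String Int) (item : String) :
    List String × PySem.Dict String Int :=
  if st.2.contains item then
    let c := st.2.getD item 0 + 1
    (st.1 ++ [item ++ "_" ++ PySem.Int.toStr c], st.2.insert item c)
  else
    (st.1 ++ [item], st.2.insert item 0)

def make_unique_index (index : List String) : List String :=
  (index.foldl mkuStep ([], PySem.Dict.empty)).1

-- ===== PORT B =====
-- first loop of Source B: positions.setdefault(item, []).append(i) — the bucket for item becomes
-- positions.get(item, []) ++ [i], which is exactly PySem.Dict.modify item [] (· ++ [i])
def mkuPositions (index : List String) : PySem.Dict String (List Int) :=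
  (PySem.List.enumerate index 0).foldl
    (fun d p => d.modify p.2 [] (fun l => l ++ [p.1])) PySem.Dict.empty

-- second loop of Source B: scatter the labels into the preallocated output list.
-- Python preallocates [None] * len(seq); the port preallocates "" — exact because every
-- position 0..len-1 occurs in exactly one bucket, so every slot is overwritten.
-- out[p] = … : p comes from enumerate of a bucket, hence a nonneg in-range index, so
-- List.set p.toNat is exact here.
def make_unique_index_alt (index : List String) : List String :=
  (mkuPositions index).items.foldl
    (fun out ip =>
      (PySem.List.enumerate ip.2 0).foldl
        (fun out kp =>
          out.set kp.2.toNat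
            (if kp.1 = 0 then ip.1 else ip.1 ++ "_" ++ PySem.Int.toStr kp.1))
        out)
    (List.replicate index.length "")

-- ===== PRECONDITION & SPEC =====
def Spec_make_unique_index (index : List String) (out : List String) : Prop := out = make_unique_index_alt index
instance (index : List String) (out : List String) : Decidable (Spec_make_unique_index index out) := by unfold Spec_make_unique_index; infer_instance

-- ===== CLAIM (what is proved, stated in full; the proofs are below) =====
def Claim_equal_make_unique_index : Prop := ∀ (index : List String), Dom_make_unique_index index → Spec_make_unique_index index (make_unique_index index)

-- ===== LEMMAS AND PROOFS =====

-- the label both programs produce for the element x whose earlier occurrences are those in pre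
def mkuLabel (pre : List String) (x : String) : String :=
  if pre.count x = 0 then x else x ++ "_" ++ PySem.Int.toStr ((pre.count x : Nat) : Int)

-- the common reference value: position j gets the label determined by the prefix before j
def mkuSpec (xs : List String) : List String :=
  (List.range xs.length).map (fun j => mkuLabel (xs.take j) (xs.getD j ""))

lemma mkuSpec_snoc (xs : List String) (y : String) :
    mkuSpec (xs ++ [y]) = mkuSpec xs ++ [mkuLabel xs y] := by
  unfold mkuSpec
  rw [List.length_append, List.length_singleton, List.range_succ, List.map_append]
  congr 1
  · apply List.map_congr_left
    intro j hj
    rw [List.mem_range] at hj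
    rw [List.take_append_of_le_length (le_of_lt hj), List.getD_eq_getElem?_getD,
      List.getD_eq_getElem?_getD, List.getElem?_append_left hj]
  · rw [List.map_singleton, List.take_left, List.getD_eq_getElem?_getD]
    simp

-- ---- A-side ----

-- invariant of A's counts dictionary after consuming pre
lemma mkuDict (pre : List String) :
    (∀ x, ((pre.foldl mkuStep ([], PySem.Dict.empty)).2.contains x = true ↔ x ∈ pre))
  ∧ (∀ x, x ∈ pre → (pre.foldl mkuStep ([], PySem.Dict.empty)).2.getD x 0 = (pre.count x : Int) - 1) := by
  induction pre using List.reverseRecOn with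
  | nil => simp [PySem.Dict.contains_empty]
  | append_singleton pre y ih =>
    obtain ⟨ihc, ihg⟩ := ih
    rw [List.foldl_append]
    have hdict : (List.foldl mkuStep ([], PySem.Dict.empty) (pre ++ [y])).2
        = (List.foldl mkuStep ([], PySem.Dict.empty) pre).2.insert y
            (if (List.foldl mkuStep ([], PySem.Dict.empty) pre).2.contains y then
              (List.foldl mkuStep ([], PySem.Dict.empty) pre).2.getD y 0 + 1 else 0) := by
      rw [List.foldl_append]
      by_cases hy : (List.foldl mkuStep ([], PySem.Dict.empty) pre).2.contains y = true <;>
        simp [mkuStep, hy]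
    rw [List.foldl_append] at hdict
    constructor
    · intro x
      rw [hdict, PySem.Dict.contains_insert]
      simp only [List.mem_append, List.mem_singleton, Bool.or_eq_true, beq_iff_eq]
      rw [ihc x]; tauto
    · intro x hx
      rw [hdict, PySem.Dict.getD_insert]
      by_cases hxy : x = y
      · subst hxy
        rw [if_pos rfl]
        by_cases hy : (List.foldl mkuStep ([], PySem.Dict.empty) pre).2.contains x = true
        · have hmem : x ∈ pre := (ihc x).mp hy
          rw [if_pos hy, ihg x hmem]
          simp [List.count_append]
        · have hmem : x ∉ pre := fun h => hy ((ihc x).mpr h)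
          rw [if_neg hy]
          simp [List.count_append, List.count_eq_zero_of_not_mem hmem]
      · have hmem : x ∈ pre := by
          rcases List.mem_append.mp hx with h | h
          · exact h
          · simp at h; exact absurd h hxy
        have hcy : List.count x [y] = 0 :=
          List.count_eq_zero_of_not_mem (by simp [hxy])
        rw [if_neg hxy, ihg x hmem]
        simp [List.count_append, hcy]

-- A on a snoc: appends exactly the label
lemma mkuA_snoc (pre : List String) (x : String) :
    make_unique_index (pre ++ [x]) = make_unique_index pre ++ [mkuLabel pre x] := by
  obtain ⟨ihc, ihg⟩ := mkuDict pre
  unfold make_unique_index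
  rw [List.foldl_append]
  by_cases hx : x ∈ pre
  · have hc : (pre.foldl mkuStep ([], PySem.Dict.empty)).2.contains x = true := (ihc x).mpr hx
    have hcnt : 0 < pre.count x := List.count_pos_iff.mpr hx
    simp only [List.foldl_cons, List.foldl_nil, mkuStep, hc, if_pos, mkuLabel,
      Nat.pos_iff_ne_zero.mp hcnt, ihg x hx]
    have : (pre.count x : Int) - 1 + 1 = (pre.count x : Int) := by ring
    simp [this]
  · have hc : (pre.foldl mkuStep ([], PySem.Dict.empty)).2.contains x = false := by
      by_contra h
      exact hx ((ihc x).mp (by revert h; cases ((pre.foldl mkuStep ([], PySem.Dict.empty)).2.contains x) <;> simp))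
    simp [mkuStep, hc, mkuLabel, List.count_eq_zero_of_not_mem hx]

lemma mkuA_eq_spec (index : List String) : make_unique_index index = mkuSpec index := by
  induction index using List.reverseRecOn with
  | nil => rfl
  | append_singleton pre x ih => rw [mkuA_snoc, mkuSpec_snoc, ih]

-- ---- B-side ----

-- a bucket's contents: the positions (as Ints) at which x occurs in xs
def mkuPosL (xs : List String) (x : String) : List Int :=
  (((PySem.List.enumerate xs 0).map (fun p => (p.2, p.1))).filter
    (fun q => q.1 == x)).map (fun q => q.2)

lemma mkuPositions_items (xs : List String) :
    (mkuPositions xs).items = (PySem.Set.ofList xs).map (fun x => (x, mkuPosL xs x)) := by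
  have hfold : mkuPositions xs
      = ((PySem.List.enumerate xs 0).map (fun p => (p.2, p.1))).foldl
          (fun d q => d.modify q.1 [] (fun l => l ++ [q.2])) PySem.Dict.empty := by
    unfold mkuPositions
    rw [List.foldl_map]
  have hkeys : (mkuPositions xs).keys = PySem.Set.ofList xs := by
    have h := PySem.Dict.keys_foldl_modify_key
      ((PySem.List.enumerate xs 0).map (fun p => (p.2, p.1)))
      (fun q : String × Int => q.1) ([] : List Int)
      (fun _ (q : String × Int) (l : List Int) => l ++ [q.2]) PySem.Dict.empty
    rw [hfold]
    refine Eq.trans h ?_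
    rw [PySem.Dict.keys_empty, PySem.Set.update_nil_left, List.map_map]
    have hc : ((fun q : String × Int => q.1) ∘ fun p : Int × String => (p.2, p.1))
        = fun p : Int × String => p.2 := rfl
    rw [hc, PySem.List.map_snd_enumerate]
  have hnodup : (mkuPositions xs).keys.Nodup := by
    rw [hfold]
    exact PySem.Dict.nodup_keys_foldl_modify_key _ (fun q : String × Int => q.1) []
      (fun _ (q : String × Int) (l : List Int) => l ++ [q.2]) _
      (by rw [PySem.Dict.keys_empty]; exact List.nodup_nil)
  have hgetD : ∀ x, (mkuPositions xs).getD x [] = mkuPosL xs x := by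
    intro x
    have h := PySem.Dict.getD_foldl_modify_append
      ((PySem.List.enumerate xs 0).map (fun p : Int × String => (p.2, p.1)))
      PySem.Dict.empty x
    rw [hfold]
    refine Eq.trans h ?_
    rw [PySem.Dict.getD_empty, List.nil_append]
    rfl
  rw [PySem.Dict.items_eq_map_keys _ hnodup [], hkeys]
  exact List.map_congr_left (fun x _ => by rw [hgetD x])

-- the k-th entry of a bucket is a position j with xs[j] = x whose prefix holds k copies of x
lemma mkuPosL_spec (xs : List String) (x : String) :
    (mkuPosL xs x).length = xs.count x ∧
    ∀ k, k < (mkuPosL xs x).length → ∃ j : Nat,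
      (mkuPosL xs x)[k]? = some (j : Int) ∧ j < xs.length ∧ xs.getD j "" = x ∧
      (xs.take j).count x = k := by
  induction xs using List.reverseRecOn with
  | nil => exact ⟨rfl, fun k hk => absurd hk (by simp [mkuPosL, PySem.List.enumerate_nil])⟩
  | append_singleton xs y ih =>
    obtain ⟨ihlen, ihk⟩ := ih
    have hsnoc : mkuPosL (xs ++ [y]) x
        = mkuPosL xs x ++ (if y = x then [(xs.length : Int)] else []) := by
      unfold mkuPosL
      rw [PySem.List.enumerate_append, PySem.List.enumerate_cons, PySem.List.enumerate_nil,
        List.map_append, List.filter_append, List.map_append]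
      congr 1
      by_cases hyx : y = x <;> simp [hyx]
    constructor
    · rw [hsnoc, List.length_append, List.count_append, ihlen]
      by_cases hyx : y = x <;> simp [hyx]
    · intro k hk
      rw [hsnoc] at hk ⊢
      by_cases hkl : k < (mkuPosL xs x).length
      · obtain ⟨j, hj1, hj2, hj3, hj4⟩ := ihk k hkl
        refine ⟨j, ?_, by simp; omega, ?_, ?_⟩
        · rw [List.getElem?_append_left hkl]; exact hj1
        · rw [List.getD_eq_getElem?_getD, List.getElem?_append_left hj2,
            ← List.getD_eq_getElem?_getD]; exact hj3
        · rw [List.take_append_of_le_length (le_of_lt hj2)]; exact hj4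
      · have hyx : y = x := by
          by_contra hyx
          rw [List.length_append] at hk
          simp [hyx] at hk
          omega
        have hkeq : k = (mkuPosL xs x).length := by
          rw [List.length_append] at hk
          simp [hyx] at hk
          omega
        refine ⟨xs.length, ?_, by simp, ?_, ?_⟩
        · rw [List.getElem?_append_right (le_of_eq hkeq.symm), hkeq]
          simp [hyx]
        · rw [List.getD_eq_getElem?_getD]
          simp [hyx]
        · rw [List.take_left, hkeq, ihlen]

-- generic fold-of-writes facts
lemma mkuWLen (ws : List (Nat × String)) (init : List String) :
    (ws.foldl (fun o w => o.set w.1 w.2) init).length = init.length := by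
  induction ws generalizing init with
  | nil => rfl
  | cons w ws ih => simp [List.foldl_cons, ih]

lemma mkuWNone (ws : List (Nat × String)) (init : List String) (p : Nat)
    (h : p ∉ ws.map (fun w => w.1)) :
    (ws.foldl (fun o w => o.set w.1 w.2) init)[p]? = init[p]? := by
  induction ws generalizing init with
  | nil => rfl
  | cons w ws ih =>
    simp only [List.map_cons, List.mem_cons, not_or] at h
    rw [List.foldl_cons, ih _ h.2, List.getElem?_set_ne (Ne.symm h.1)]

lemma mkuWConst (ws : List (Nat × String)) (init : List String) (p : Nat) (v : String)
    (h : ∀ w ∈ ws, w.1 = p → w.2 = v) (hmem : p ∈ ws.map (fun w => w.1))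
    (hp : p < init.length) :
    (ws.foldl (fun o w => o.set w.1 w.2) init)[p]? = some v := by
  induction ws generalizing init with
  | nil => simp at hmem
  | cons w ws ih =>
    rw [List.foldl_cons]
    by_cases hrest : p ∈ ws.map (fun w => w.1)
    · exact ih _ (fun w hw => h w (List.mem_cons_of_mem _ hw)) hrest (by simpa using hp)
    · have hw1 : w.1 = p := by
        simp only [List.map_cons, List.mem_cons] at hmem
        tauto
      rw [mkuWNone _ _ _ hrest, hw1,
        List.getElem?_set_self hp, h w (List.mem_cons_self) hw1]

-- nested fold of writes = flat fold over the flatMap of write lists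
lemma mkuFlat (l : List (String × List Int)) (init : List String) :
    l.foldl
      (fun out ip =>
        (PySem.List.enumerate ip.2 0).foldl
          (fun out kp =>
            out.set kp.2.toNat
              (if kp.1 = 0 then ip.1 else ip.1 ++ "_" ++ PySem.Int.toStr kp.1))
          out)
      init
    = (l.flatMap (fun ip => (PySem.List.enumerate ip.2 0).map
        (fun kp => (kp.2.toNat,
          if kp.1 = 0 then ip.1 else ip.1 ++ "_" ++ PySem.Int.toStr kp.1)))).foldl
        (fun o w => o.set w.1 w.2) init := by
  induction l generalizing init with
  | nil => rfl
  | cons ip l ih =>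
    rw [List.foldl_cons, List.flatMap_cons, List.foldl_append, ih, List.foldl_map]

-- every write in the flattened write list targets its own position's spec label
lemma mkuB_eq_spec (index : List String) : make_unique_index_alt index = mkuSpec index := by
  unfold make_unique_index_alt
  rw [mkuPositions_items, mkuFlat]
  set ws := ((PySem.Set.ofList index).map (fun x => (x, mkuPosL index x))).flatMap
      (fun ip => (PySem.List.enumerate ip.2 0).map
        (fun kp => (kp.2.toNat,
          if kp.1 = 0 then ip.1 else ip.1 ++ "_" ++ PySem.Int.toStr kp.1))) with hws
  have hwrites : ∀ w ∈ ws, ∃ j : Nat, w.1 = j ∧ j < index.length ∧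
      w.2 = mkuLabel (index.take j) (index.getD j "") := by
    intro w hw
    rw [hws] at hw
    obtain ⟨ip, hip, hw⟩ := List.mem_flatMap.mp hw
    obtain ⟨x, hx, hipx⟩ := List.mem_map.mp hip
    obtain ⟨kp, hkp, hwkp⟩ := List.mem_map.mp hw
    subst hipx
    obtain ⟨k, hklt, hkpk⟩ := (PySem.List.mem_enumerate_iff _ _ _).mp hkp
    obtain ⟨j, hj1', hj2, hj3, hj4⟩ := (mkuPosL_spec index x).2 k hklt
    have hj1 : (mkuPosL index x)[k] = (j : Int) := by
      have hg := List.getElem?_eq_getElem hklt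
      rw [hj1'] at hg
      exact (Option.some_inj.mp hg).symm
    refine ⟨j, ?_, hj2, ?_⟩
    · rw [← hwkp, hkpk]
      simp [hj1]
    · rw [← hwkp, hkpk]
      simp only [zero_add]
      unfold mkuLabel
      rw [hj3, hj4]
      by_cases hk0 : k = 0
      · simp [hk0]
      · simp [hk0]
  have hcover : ∀ j : Nat, j < index.length → j ∈ ws.map (fun w => w.1) := by
    intro j hj
    have hx : index.getD j "" ∈ index := by
      rw [List.getD_eq_getElem?_getD, List.getElem?_eq_getElem hj]
      exact List.getElem_mem hj
    have hmemP : (j : Int) ∈ mkuPosL index (index.getD j "") := by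
      unfold mkuPosL
      refine List.mem_map.mpr ⟨(index.getD j "", (j : Int)), ?_, rfl⟩
      refine List.mem_filter.mpr ⟨List.mem_map.mpr ⟨((j : Int), index.getD j ""), ?_, rfl⟩, by simp⟩
      refine (PySem.List.mem_enumerate_iff _ _ _).mpr ⟨j, hj, ?_⟩
      rw [List.getD_eq_getElem?_getD, List.getElem?_eq_getElem hj]
      simp
    obtain ⟨k, hklt, hkj⟩ := List.mem_iff_getElem.mp hmemP
    refine List.mem_map.mpr ⟨(((j : Int)).toNat,
      if ((0 : Int) + k) = 0 then index.getD j ""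
      else index.getD j "" ++ "_" ++ PySem.Int.toStr ((0 : Int) + k)), ?_, by simp⟩
    rw [hws]
    refine List.mem_flatMap.mpr ⟨(index.getD j "", mkuPosL index (index.getD j "")),
      List.mem_map.mpr ⟨index.getD j "", (PySem.Set.mem_ofList _ _).mpr hx, rfl⟩, ?_⟩
    refine List.mem_map.mpr ⟨((0 : Int) + k, (j : Int)), ?_, by simp⟩
    exact (PySem.List.mem_enumerate_iff _ _ _).mpr ⟨k, hklt, by rw [hkj]⟩
  have hlen : (ws.foldl (fun o w => o.set w.1 w.2) (List.replicate index.length "")).length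
      = index.length := by rw [mkuWLen, List.length_replicate]
  have hlspec : (mkuSpec index).length = index.length := by
    unfold mkuSpec; rw [List.length_map, List.length_range]
  apply List.ext_getElem?
  intro p
  by_cases hp : p < index.length
  · have hv := mkuWConst ws (List.replicate index.length "") p
      (mkuLabel (index.take p) (index.getD p ""))
      (fun w hw hwp => by
        obtain ⟨j, hj1, _, hj3⟩ := hwrites w hw
        rw [hj3, ← hwp, hj1])
      (hcover p hp) (by rw [List.length_replicate]; exact hp)
    rw [hv]
    unfold mkuSpec
    rw [List.getElem?_map, List.getElem?_range hp]
    rfl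
  · rw [List.getElem?_eq_none (by rw [hlen]; omega),
      List.getElem?_eq_none (by rw [hlspec]; omega)]

-- ===== VERDICT (by name: the statement is the Claim_ definition above) =====
theorem make_unique_index_spec : Claim_equal_make_unique_index :=
  fun index _ => (mkuA_eq_spec index).trans (mkuB_eq_spec index).symm
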